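-- pv_equiv track=rewrite | github.com/LeanVibe/bee-hive | app/core/quality_gates.py | _prioritize_recommendations
-- ===== SOURCE A (Python) =====
-- from typing import Dict, List, Optional, Any, Tuple
--
-- def _prioritize_recommendations(recommendations: List[str]) -> List[str]:
--     """Prioritize recommendations by importance."""
--     # Simple keyword-based prioritization
--     priority_keywords = [
--         ("security", 100),
--         ("vulnerability", 95),
--         ("critical", 90),
--         ("performance", 80),
--         ("test", 75),
--         ("documentation", 50)
--     ]
--
--     def get_priority(recommendation):
--         for keyword, priority in priority_keywords:
--             if keyword.lower() in recommendation.lower():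
--                 return priority
--         return 0
--
--     return sorted(recommendations, key=get_priority, reverse=True)
-- ===== SOURCE B (Python) =====
-- def _prioritize_recommendations(recommendations):
--     """Prioritize recommendations by importance (multi-pass stable partition, no sort)."""
--     keywords = ["security", "vulnerability", "critical", "performance", "test", "documentation"]
--     result = []
--     rest = recommendations
--     for kw in keywords:
--         matched = []
--         unmatched = []
--         for r in rest:
--             if kw in r.lower():
--                 matched.append(r)
--             else:
--                 unmatched.append(r)
--         result.extend(matched)
--         rest = unmatched
--     return result + rest
-- ===== Notes on version B (the rewrite author's own statement) =====
-- stated objective: alternative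
-- what changed: Replaces sorted-with-key by a stable multi-pass partition: for each priority keyword in descending order, split the remaining items into matched/unmatched in one pass and emit the matched bucket, so no per-item priority value and no sort are used.
import Mathlib
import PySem

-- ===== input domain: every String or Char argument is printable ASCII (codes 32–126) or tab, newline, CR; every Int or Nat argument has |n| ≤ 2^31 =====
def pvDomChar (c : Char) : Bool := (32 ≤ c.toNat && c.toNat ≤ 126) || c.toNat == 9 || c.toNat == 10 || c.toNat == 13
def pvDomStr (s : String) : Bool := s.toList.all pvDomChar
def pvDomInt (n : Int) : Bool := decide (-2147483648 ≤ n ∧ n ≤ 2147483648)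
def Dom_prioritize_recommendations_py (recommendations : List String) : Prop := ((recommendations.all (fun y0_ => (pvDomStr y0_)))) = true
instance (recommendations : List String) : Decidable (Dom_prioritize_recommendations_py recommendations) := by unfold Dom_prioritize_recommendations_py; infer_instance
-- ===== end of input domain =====

-- B replaces A's sorted-with-key by a stable multi-pass keyword partition (no sort); same result proved for all inputs.


-- ===== PORT A =====
def pvKeywords : List (String × Int) :=
  [("security", 100), ("vulnerability", 95), ("critical", 90),
   ("performance", 80), ("test", 75), ("documentation", 50)]

-- A's get_priority: first keyword whose lowercase occurs in recommendation.lower() wins, else 0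
def pvGetPriority : List (String × Int) → String → Int
  | [], _ => 0
  | (k, p) :: t, r =>
      if PySem.Str.isIn (PySem.Str.lower k) (PySem.Str.lower r) then p else pvGetPriority t r

def prioritize_recommendations_py (recommendations : List String) : List String :=
  PySem.List.sorted recommendations (pvGetPriority pvKeywords) true

-- ===== PORT B =====
def pvKws : List String :=
  ["security", "vulnerability", "critical", "performance", "test", "documentation"]

-- one pass over the remaining items: append to matched / unmatched
def pvPartStep (kw : String) (acc : List String × List String) (r : String) :
    List String × List String :=
  if PySem.Str.isIn kw (PySem.Str.lower r) then (acc.1 ++ [r], acc.2) else (acc.1, acc.2 ++ [r])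

def prioritize_recommendations_py_alt (recommendations : List String) : List String :=
  let st := pvKws.foldl
    (fun (st : List String × List String) kw =>
      let pr := st.2.foldl (pvPartStep kw) ([], [])
      (st.1 ++ pr.1, pr.2))
    ([], recommendations)
  st.1 ++ st.2

-- ===== PRECONDITION & SPEC =====
def Spec_prioritize_recommendations_py (recommendations : List String) (out : List String) : Prop := out = prioritize_recommendations_py_alt recommendations
instance (recommendations : List String) (out : List String) : Decidable (Spec_prioritize_recommendations_py recommendations out) := by unfold Spec_prioritize_recommendations_py; infer_instance

-- ===== CLAIM (what is proved, stated in full; the proofs are below) =====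
def Claim_equal_prioritize_recommendations_py : Prop := ∀ (recommendations : List String), Dom_prioritize_recommendations_py recommendations → Spec_prioritize_recommendations_py recommendations (prioritize_recommendations_py recommendations)

-- ===== LEMMAS AND PROOFS =====

-- B's containment test (keywords are already lowercase literals, so A's extra lower() is the identity on them)
def pvCnt (kw r : String) : Bool := PySem.Str.isIn kw (PySem.Str.lower r)

-- priority of the first matching keyword, with B's containment test
def pvKeyP : List (String × Int) → String → Int
  | [], _ => 0
  | (k, p) :: t, r => if pvCnt k r then p else pvKeyP t r

-- the bucketed output: matched items of each tier in input order, then the leftovers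
def pvF : List (String × Int) → List String → List String
  | [], xs => xs
  | (k, _) :: t, xs => xs.filter (fun r => pvCnt k r) ++ pvF t (xs.filter (fun r => !pvCnt k r))

-- priorities strictly decreasing and positive
def pvGood : List (String × Int) → Prop
  | [] => True
  | (_, p) :: t => 0 < p ∧ (∀ q ∈ t, q.2 < p) ∧ pvGood t

lemma pvGetPriority_eq_keyP (r : String) :
    pvGetPriority pvKeywords r = pvKeyP pvKeywords r := by
  have h1 : PySem.Str.lower "security" = "security" := by decide
  have h2 : PySem.Str.lower "vulnerability" = "vulnerability" := by decide
  have h3 : PySem.Str.lower "critical" = "critical" := by decide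
  have h4 : PySem.Str.lower "performance" = "performance" := by decide
  have h5 : PySem.Str.lower "test" = "test" := by decide
  have h6 : PySem.Str.lower "documentation" = "documentation" := by decide
  simp [pvKeywords, pvGetPriority, pvKeyP, pvCnt, h1, h2, h3, h4, h5, h6]

lemma pvKeyP_lt {t : List (String × Int)} {p : Int} (hp : 0 < p)
    (ht : ∀ q ∈ t, q.2 < p) (r : String) : pvKeyP t r < p := by
  induction t with
  | nil => simpa [pvKeyP] using hp
  | cons q t ih =>
      obtain ⟨k, pq⟩ := q
      simp only [pvKeyP]
      split
      · exact ht (k, pq) (List.mem_cons_self ..)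
      · exact ih (fun q hq => ht q (List.mem_cons_of_mem _ hq))

lemma pvMem_F {kwsP : List (String × Int)} {xs : List String} {y : String}
    (h : y ∈ pvF kwsP xs) : y ∈ xs := by
  induction kwsP generalizing xs with
  | nil => simpa [pvF] using h
  | cons q t ih =>
      obtain ⟨k, p⟩ := q
      simp only [pvF, List.mem_append] at h
      rcases h with h | h
      · exact List.mem_of_mem_filter h
      · exact List.mem_of_mem_filter (ih h)

lemma insertBy_congr {α : Type} (before before' : α → α → Bool) (x : α) (ys : List α)
    (h : ∀ y ∈ ys, before x y = before' x y) :
    PySem.List.insertBy before x ys = PySem.List.insertBy before' x ys := by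
  induction ys with
  | nil => rfl
  | cons y ys ih =>
      simp only [PySem.List.insertBy]
      rw [h y (List.mem_cons_self ..)]
      split
      · rfl
      · rw [ih (fun z hz => h z (List.mem_cons_of_mem _ hz))]

lemma insertBy_skip {α : Type} (before : α → α → Bool) (x : α) (as bs : List α)
    (h : ∀ a ∈ as, before x a = false) :
    PySem.List.insertBy before x (as ++ bs) = as ++ PySem.List.insertBy before x bs := by
  induction as with
  | nil => rfl
  | cons a as ih =>
      simp only [List.cons_append, PySem.List.insertBy, h a (List.mem_cons_self ..)]
      simp only [Bool.false_eq_true, if_false]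
      rw [ih (fun a ha => h a (List.mem_cons_of_mem _ ha))]

lemma pvInsert_F (kwsP : List (String × Int)) (hg : pvGood kwsP) (x : String) (xs : List String) :
    PySem.List.insertBy (fun a b => decide (pvKeyP kwsP b < pvKeyP kwsP a)) x (pvF kwsP xs)
      = pvF kwsP (xs ++ [x]) := by
  induction kwsP generalizing xs with
  | nil =>
      simp only [pvF]
      exact PySem.List.insertBy_of_forall_not_before _ x xs (by simp [pvKeyP])
  | cons q t ih =>
      obtain ⟨k, p⟩ := q
      obtain ⟨hp, hlt, hgt⟩ := hg
      have hkey_lt : ∀ r, pvKeyP t r < p := pvKeyP_lt hp hlt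
      by_cases hc : pvCnt k x = true
      · -- x matches this tier: it goes to the end of this tier's bucket
        have hkx : pvKeyP ((k, p) :: t) x = p := by simp [pvKeyP, hc]
        have hskip : ∀ a ∈ xs.filter (fun r => pvCnt k r),
            (decide (pvKeyP ((k,p)::t) a < pvKeyP ((k,p)::t) x)) = false := by
          intro a ha
          have hca : pvCnt k a = true := by
            simpa using (List.mem_filter.mp ha).2
          simp [pvKeyP, hca, hc]
        rw [pvF, insertBy_skip _ _ _ _ hskip]
        have htail : PySem.List.insertBy
            (fun a b => decide (pvKeyP ((k,p)::t) b < pvKeyP ((k,p)::t) a)) x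
            (pvF t (xs.filter (fun r => !pvCnt k r)))
            = x :: pvF t (xs.filter (fun r => !pvCnt k r)) := by
          cases hF : pvF t (xs.filter (fun r => !pvCnt k r)) with
          | nil => rfl
          | cons b bs =>
              have hb : b ∈ xs.filter (fun r => !pvCnt k r) := by
                apply pvMem_F; rw [hF]; exact List.mem_cons_self ..
              have hcb : pvCnt k b = false := by
                have := (List.mem_filter.mp hb).2; simpa using this
              have : pvKeyP ((k,p)::t) b < pvKeyP ((k,p)::t) x := by
                simp only [pvKeyP, hcb, hc, if_pos]
                simpa using hkey_lt b
              simp [PySem.List.insertBy, this]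
        rw [htail]
        simp [pvF, List.filter_append, hc]
      · -- x does not match this tier: it is inserted within the lower tiers
        have hcx : pvCnt k x = false := by simpa using hc
        have hkx : pvKeyP ((k, p) :: t) x = pvKeyP t x := by simp [pvKeyP, hcx]
        have hskip : ∀ a ∈ xs.filter (fun r => pvCnt k r),
            (decide (pvKeyP ((k,p)::t) a < pvKeyP ((k,p)::t) x)) = false := by
          intro a ha
          have hca : pvCnt k a = true := by
            simpa using (List.mem_filter.mp ha).2
          have : ¬ (p < pvKeyP t x) := not_lt_of_gt (hkey_lt x)
          simp [pvKeyP, hca, hcx, this]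
        rw [pvF, insertBy_skip _ _ _ _ hskip]
        have hcong : PySem.List.insertBy
            (fun a b => decide (pvKeyP ((k,p)::t) b < pvKeyP ((k,p)::t) a)) x
            (pvF t (xs.filter (fun r => !pvCnt k r)))
            = PySem.List.insertBy
            (fun a b => decide (pvKeyP t b < pvKeyP t a)) x
            (pvF t (xs.filter (fun r => !pvCnt k r))) := by
          apply insertBy_congr
          intro y hy
          have hcy : pvCnt k y = false := by
            have := (List.mem_filter.mp (pvMem_F hy)).2; simpa using this
          simp [pvKeyP, hcy, hcx]
        rw [hcong, ih hgt]
        simp [pvF, List.filter_append, hcx]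

lemma pvF_nil (kwsP : List (String × Int)) : pvF kwsP [] = [] := by
  induction kwsP with
  | nil => rfl
  | cons q t ih => obtain ⟨k, p⟩ := q; simp [pvF, ih]

lemma pvSorted_eq_F (kwsP : List (String × Int)) (hg : pvGood kwsP) (xs : List String) :
    PySem.List.sorted xs (pvKeyP kwsP) true = pvF kwsP xs := by
  rw [PySem.List.sorted_rev_eq_foldl_insertBy]
  induction xs using List.reverseRecOn with
  | nil => simp [pvF_nil]
  | append_singleton xs x ih =>
      rw [List.foldl_append, List.foldl_cons, List.foldl_nil, ih, pvInsert_F kwsP hg]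

lemma pvPart_spec (kw : String) (xs m u : List String) :
    xs.foldl (pvPartStep kw) (m, u)
      = (m ++ xs.filter (fun r => pvCnt kw r), u ++ xs.filter (fun r => !pvCnt kw r)) := by
  induction xs generalizing m u with
  | nil => simp
  | cons x xs ih =>
      rw [List.foldl_cons]
      by_cases h : pvCnt kw x = true
      · have hstep : pvPartStep kw (m, u) x = (m ++ [x], u) := by
          simp only [pvPartStep]
          rw [show PySem.Str.isIn kw (PySem.Str.lower x) = true from h]
          simp
        rw [hstep, ih]
        simp [h]
      · have hb : pvCnt kw x = false := by simpa using h
        have hstep : pvPartStep kw (m, u) x = (m, u ++ [x]) := by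
          simp only [pvPartStep]
          rw [show PySem.Str.isIn kw (PySem.Str.lower x) = false from hb]
          simp
        rw [hstep, ih]
        simp [hb]

lemma pvB_fold (kwsP : List (String × Int)) (res rest : List String) :
    (let st := (kwsP.map (fun q => q.1)).foldl
        (fun (st : List String × List String) kw =>
          let pr := st.2.foldl (pvPartStep kw) ([], [])
          (st.1 ++ pr.1, pr.2))
        (res, rest)
     st.1 ++ st.2) = res ++ pvF kwsP rest := by
  induction kwsP generalizing res rest with
  | nil => simp [pvF]
  | cons q t ih =>
      obtain ⟨k, p⟩ := q
      simp only [List.map_cons, List.foldl_cons]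
      rw [show rest.foldl (pvPartStep k) ([], [])
            = ([] ++ rest.filter (fun r => pvCnt k r),
               [] ++ rest.filter (fun r => !pvCnt k r)) from pvPart_spec k rest [] []]
      simp only [List.nil_append]
      rw [ih]
      simp [pvF]

-- ===== VERDICT (by name: the statement is the Claim_ definition above) =====
theorem prioritize_recommendations_py_spec : Claim_equal_prioritize_recommendations_py := by
  intro recs _
  show prioritize_recommendations_py recs = prioritize_recommendations_py_alt recs
  have hkeys : pvGetPriority pvKeywords = pvKeyP pvKeywords :=
    funext pvGetPriority_eq_keyP
  have hgood : pvGood pvKeywords := by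
    simp only [pvGood, pvKeywords]
    norm_num
  have hA : prioritize_recommendations_py recs = pvF pvKeywords recs := by
    rw [prioritize_recommendations_py, hkeys, pvSorted_eq_F pvKeywords hgood]
  have hB : prioritize_recommendations_py_alt recs = [] ++ pvF pvKeywords recs := by
    rw [prioritize_recommendations_py_alt]
    exact pvB_fold pvKeywords [] recs
  rw [hA, hB, List.nil_append]
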